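-- pv_equiv track=rewrite | github.com/wimi321/weiqi-kid-teaching | go_review.py | split_main_nodes
-- ===== SOURCE A (Python) =====
-- from typing import Any, Dict, List, Optional, Tuple
--
-- def split_main_nodes(sgf_text: str) -> List[str]:
--     nodes: List[str] = []
--     depth = 0
--     in_bracket = False
--     escaped = False
--     node_start: Optional[int] = None
--
--     for i, ch in enumerate(sgf_text):
--         if in_bracket:
--             if escaped:
--                 escaped = False
--             elif ch == "\\":
--                 escaped = True
--             elif ch == "]":
--                 in_bracket = False
--             continue
--
--         if ch == "[":
--             in_bracket = True
--             continue
--         if ch == "(":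
--             depth += 1
--             continue
--         if ch == ")":
--             if depth == 1 and node_start is not None:
--                 nodes.append(sgf_text[node_start:i])
--                 node_start = None
--             depth -= 1
--             continue
--         if ch == ";" and depth == 1:
--             if node_start is not None:
--                 nodes.append(sgf_text[node_start:i])
--             node_start = i + 1
--     if node_start is not None:
--         nodes.append(sgf_text[node_start:])
--     return nodes
-- ===== SOURCE B (Python) =====
-- from typing import List, Optional, Tuple
--
--
-- def _structural_tokens(s: str) -> List[Tuple[str, int]]:
--     """Tokenize: skip bracketed property values (with backslash escapes,
--     tolerating an unterminated bracket), emit ('(',i), (')',i), (';',i)."""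
--     toks: List[Tuple[str, int]] = []
--     i = 0
--     n = len(s)
--     while i < n:
--         c = s[i]
--         if c == '[':
--             i += 1
--             while i < n:
--                 if s[i] == '\\':
--                     i += 2
--                 elif s[i] == ']':
--                     i += 1
--                     break
--                 else:
--                     i += 1
--         elif c in '();':
--             toks.append((c, i))
--             i += 1
--         else:
--             i += 1
--     return toks
--
--
-- def split_main_nodes(sgf_text: str) -> List[str]:
--     nodes: List[str] = []
--     depth = 0
--     node_start: Optional[int] = None
--     for c, i in _structural_tokens(sgf_text):
--         if c == '(':
--             depth += 1
--         elif c == ')':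
--             if depth == 1 and node_start is not None:
--                 nodes.append(sgf_text[node_start:i])
--                 node_start = None
--             depth -= 1
--         else:  # ';'
--             if depth == 1:
--                 if node_start is not None:
--                     nodes.append(sgf_text[node_start:i])
--                 node_start = i + 1
--     if node_start is not None:
--         nodes.append(sgf_text[node_start:])
--     return nodes
-- ===== Notes on version B (the rewrite author's own statement) =====
-- stated objective: alternative
-- what changed: B replaces A's single-pass boolean state machine (in-bracket/escaped flags checked on every character) with a two-phase design: a tokenizer that skips bracketed property values with an inner index-jumping loop and emits only the structural parenthesis and semicolon tokens with their positions, then a simple fold over the token list maintaining depth and node_start.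
import Mathlib
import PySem

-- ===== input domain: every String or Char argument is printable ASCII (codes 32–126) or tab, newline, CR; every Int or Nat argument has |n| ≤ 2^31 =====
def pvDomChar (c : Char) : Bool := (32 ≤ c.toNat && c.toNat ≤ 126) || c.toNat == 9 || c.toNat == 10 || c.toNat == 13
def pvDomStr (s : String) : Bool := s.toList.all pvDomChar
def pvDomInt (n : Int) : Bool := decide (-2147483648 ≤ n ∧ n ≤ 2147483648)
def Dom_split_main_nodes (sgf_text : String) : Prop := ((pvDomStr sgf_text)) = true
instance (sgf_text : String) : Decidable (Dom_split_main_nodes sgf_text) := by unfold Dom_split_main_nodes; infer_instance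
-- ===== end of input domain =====

-- B tokenizes the SGF text once into structural tokens (skipping bracketed
-- property values) and folds over the tokens, instead of A's per-character
-- boolean state machine; objective: alternative decomposition, same cost.

-- sgf_text[a:b] for 0 ≤ a ≤ b ≤ len (always the case at the call sites): exact
def pvSlice (s : List Char) (a b : Nat) : String := String.ofList ((s.drop a).take (b - a))

-- ===== PORT A =====
def pvAGo (s : List Char) : List Char → Nat → List String → Int → Bool → Bool → Option Nat → List String
  | [], _, nodes, _, _, _, ns =>
      match ns with
      | some a => nodes ++ [String.ofList (s.drop a)]   -- sgf_text[node_start:]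
      | none => nodes
  | ch :: rest, i, nodes, depth, inB, esc, ns =>
      if inB then
        if esc then pvAGo s rest (i+1) nodes depth true false ns
        else if ch = '\\' then pvAGo s rest (i+1) nodes depth true true ns
        else if ch = ']' then pvAGo s rest (i+1) nodes depth false false ns
        else pvAGo s rest (i+1) nodes depth true false ns
      else if ch = '[' then pvAGo s rest (i+1) nodes depth true false ns
      else if ch = '(' then pvAGo s rest (i+1) nodes (depth+1) false false ns
      else if ch = ')' then
        if depth = 1 then
          match ns with
          | some a => pvAGo s rest (i+1) (nodes ++ [pvSlice s a i]) (depth-1) false false none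
          | none => pvAGo s rest (i+1) nodes (depth-1) false false none
        else pvAGo s rest (i+1) nodes (depth-1) false false ns
      else if ch = ';' ∧ depth = 1 then
        match ns with
        | some a => pvAGo s rest (i+1) (nodes ++ [pvSlice s a i]) depth false false (some (i+1))
        | none => pvAGo s rest (i+1) nodes depth false false (some (i+1))
      else pvAGo s rest (i+1) nodes depth false false ns

def split_main_nodes (sgf_text : String) : List String :=
  pvAGo sgf_text.toList sgf_text.toList 0 [] 0 false false none

-- ===== PORT B =====
-- inner while loop of _structural_tokens: consume a bracketed value
def pvSkipBr (cs : List Char) (i : Nat) : List Char × Nat :=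
  match cs with
  | [] => ([], i)
  | c :: rest =>
    if c = '\\' then pvSkipBr (rest.drop 1) (i+2)
    else if c = ']' then (rest, i+1)
    else pvSkipBr rest (i+1)
termination_by cs.length
decreasing_by all_goals (simp; try omega)

theorem pvSkipBr_len (cs : List Char) (i : Nat) : (pvSkipBr cs i).1.length ≤ cs.length := by
  fun_induction pvSkipBr cs i with
  | case1 => simp
  | case2 i rest ih => simp at ih ⊢; omega
  | case3 i rest h => simp
  | case4 i c rest h h' ih => simp at ih ⊢; omega

def pvToks (cs : List Char) (i : Nat) : List (Char × Nat) :=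
  match cs with
  | [] => []
  | c :: rest =>
    if c = '[' then pvToks (pvSkipBr rest (i+1)).1 (pvSkipBr rest (i+1)).2
    else if c = '(' ∨ c = ')' ∨ c = ';' then (c, i) :: pvToks rest (i+1)
    else pvToks rest (i+1)
termination_by cs.length
decreasing_by
  · have := pvSkipBr_len rest (i+1); simp; omega
  · simp
  · simp

def pvBLoop (s : List Char) : List (Char × Nat) → List String → Int → Option Nat → List String
  | [], nodes, _, ns =>
      match ns with
      | some a => nodes ++ [String.ofList (s.drop a)]
      | none => nodes
  | (c, i) :: ts, nodes, depth, ns =>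
      if c = '(' then pvBLoop s ts nodes (depth+1) ns
      else if c = ')' then
        if depth = 1 then
          match ns with
          | some a => pvBLoop s ts (nodes ++ [pvSlice s a i]) (depth-1) none
          | none => pvBLoop s ts nodes (depth-1) none
        else pvBLoop s ts nodes (depth-1) ns
      else  -- ';'
        if depth = 1 then
          match ns with
          | some a => pvBLoop s ts (nodes ++ [pvSlice s a i]) depth (some (i+1))
          | none => pvBLoop s ts nodes depth (some (i+1))
        else pvBLoop s ts nodes depth ns

def split_main_nodes_alt (sgf_text : String) : List String :=
  pvBLoop sgf_text.toList (pvToks sgf_text.toList 0) [] 0 none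

-- ===== PRECONDITION & SPEC =====
def Spec_split_main_nodes (sgf_text : String) (out : List String) : Prop := out = split_main_nodes_alt sgf_text
instance (sgf_text : String) (out : List String) : Decidable (Spec_split_main_nodes sgf_text out) := by unfold Spec_split_main_nodes; infer_instance

-- ===== CLAIM (what is proved, stated in full; the proofs are below) =====
def Claim_equal_split_main_nodes : Prop := ∀ (sgf_text : String), Dom_split_main_nodes sgf_text → Spec_split_main_nodes sgf_text (split_main_nodes sgf_text)

-- ===== LEMMAS AND PROOFS =====

-- A's in-bracket state machine agrees with B's bracket-skipping subroutine
theorem pvAGo_bracket (s : List Char) (cs : List Char) (i : Nat) (nodes : List String)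
    (depth : Int) (ns : Option Nat) :
    pvAGo s cs i nodes depth true false ns
      = pvAGo s (pvSkipBr cs i).1 (pvSkipBr cs i).2 nodes depth false false ns := by
  fun_induction pvSkipBr cs i with
  | case1 i => simp [pvAGo]
  | case2 i rest ih =>
      cases rest with
      | nil => simp [pvSkipBr, pvAGo]
      | cons c' rest2 => simpa [pvAGo] using ih
  | case3 i rest h => simp [pvAGo, h]
  | case4 i c rest h h' ih => simpa [pvAGo, h, h'] using ih

-- main loop invariant: A's pass = B's fold over the token list
theorem pvAGo_eq_pvBLoop (s : List Char) (cs : List Char) (i : Nat) :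
    ∀ (nodes : List String) (depth : Int) (ns : Option Nat),
    pvAGo s cs i nodes depth false false ns = pvBLoop s (pvToks cs i) nodes depth ns := by
  fun_induction pvToks cs i with
  | case1 i => intro nodes depth ns; simp [pvAGo, pvBLoop]
  | case2 i rest ih =>
      intro nodes depth ns
      rw [show pvAGo s ('['::rest) i nodes depth false false ns
            = pvAGo s rest (i+1) nodes depth true false ns by simp [pvAGo]]
      rw [pvAGo_bracket]
      exact ih nodes depth ns
  | case3 i c rest h h' ih =>
      intro nodes depth ns
      rcases h' with h' | h' | h' <;> subst h' <;>
        simp only [pvAGo, pvBLoop] <;>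
        split_ifs <;> simp_all
  | case4 i c rest h h' ih =>
      intro nodes depth ns
      have h1 : c ≠ '(' := fun e => h' (Or.inl e)
      have h2 : c ≠ ')' := fun e => h' (Or.inr (Or.inl e))
      have h3 : c ≠ ';' := fun e => h' (Or.inr (Or.inr e))
      rw [show pvAGo s (c::rest) i nodes depth false false ns
            = pvAGo s rest (i+1) nodes depth false false ns by
          simp [pvAGo, h, h1, h2, h3]]
      exact ih nodes depth ns

-- ===== VERDICT (by name: the statement is the Claim_ definition above) =====
theorem split_main_nodes_spec : Claim_equal_split_main_nodes := by
  intro s _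
  unfold Spec_split_main_nodes split_main_nodes split_main_nodes_alt
  exact pvAGo_eq_pvBLoop _ _ _ _ _ _
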